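-- pv_equiv track=rewrite | github.com/Cassin01/Cooporate | main.py | use_till_find
-- ===== SOURCE A (Python) =====
-- def use_till_find(lines, module_name):
--     codef = ""
--     codeb = ""
--     f = True
--     space4 = '    '
--     for line in lines.split("\n"):
--         if module_name in line:
--             f = False
--         if f == True:
--             codef += space4 + space4 + line + '\n'
--         elif f == False:
--             codeb += space4 + space4 + line + '\n'
--     return (codef, codeb)
-- ===== SOURCE B (Python) =====
-- def use_till_find(lines, module_name):
--     ls = lines.split("\n")
--     i = next((k for k, line in enumerate(ls) if module_name in line), len(ls))
--     def fmt(part):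
--         return "".join("        " + line + "\n" for line in part)
--     return (fmt(ls[:i]), fmt(ls[i:]))
-- ===== Notes on version B (the rewrite author's own statement) =====
-- stated objective: simpler
-- what changed: Replaced the flag-driven single accumulation loop by locate-then-format: find the index of the first matching line (default len), then join the 8-space-prefixed lines of the two slices.
import Mathlib
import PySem

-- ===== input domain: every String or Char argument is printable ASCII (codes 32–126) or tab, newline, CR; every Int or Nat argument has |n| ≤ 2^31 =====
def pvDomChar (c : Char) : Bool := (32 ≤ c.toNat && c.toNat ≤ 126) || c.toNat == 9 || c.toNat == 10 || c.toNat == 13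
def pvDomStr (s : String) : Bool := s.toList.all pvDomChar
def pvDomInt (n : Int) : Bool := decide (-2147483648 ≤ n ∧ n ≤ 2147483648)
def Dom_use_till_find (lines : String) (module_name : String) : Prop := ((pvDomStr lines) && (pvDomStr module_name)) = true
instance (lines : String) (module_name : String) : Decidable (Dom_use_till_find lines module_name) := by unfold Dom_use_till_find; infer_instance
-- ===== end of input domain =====

-- B replaces A's flag-driven accumulation loop by locate-then-format (find the first
-- matching line's index, then join the prefixed lines of the two slices): simpler decomposition.


-- ===== PORT A =====
-- one loop iteration of A: state is (codef, codeb, f), over List Char accumulators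
def pvStepA (m : List Char) (st : List Char × List Char × Bool) (line : List Char) : List Char × List Char × Bool :=
  let f : Bool := if PySem.Chars.isIn m line then false else st.2.2
  if f = true then (st.1 ++ "    ".toList ++ "    ".toList ++ line ++ ['\n'], st.2.1, f)
  else (st.1, st.2.1 ++ "    ".toList ++ "    ".toList ++ line ++ ['\n'], f)

def use_till_find (lines : String) (module_name : String) : String × String :=
  let r := (PySem.Chars.splitOn lines.toList "\n".toList).foldl (pvStepA module_name.toList) ([], [], true)
  (String.ofList r.1, String.ofList r.2.1)

-- ===== PORT B =====
def pvFmtB (part : List (List Char)) : List Char :=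
  part.flatMap (fun line => "        ".toList ++ line ++ ['\n'])

def use_till_find_alt (lines : String) (module_name : String) : String × String :=
  let ls := PySem.Chars.splitOn lines.toList "\n".toList
  let i := ls.findIdx (fun line => PySem.Chars.isIn module_name.toList line)
  (String.ofList (pvFmtB (ls.take i)), String.ofList (pvFmtB (ls.drop i)))

-- ===== PRECONDITION & SPEC =====
def Spec_use_till_find (lines : String) (module_name : String) (out : String × String) : Prop := out = use_till_find_alt lines module_name
instance (lines : String) (module_name : String) (out : String × String) : Decidable (Spec_use_till_find lines module_name out) := by unfold Spec_use_till_find; infer_instance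

-- ===== CLAIM (what is proved, stated in full; the proofs are below) =====
def Claim_equal_use_till_find : Prop := ∀ (lines : String) (module_name : String), Dom_use_till_find lines module_name → Spec_use_till_find lines module_name (use_till_find lines module_name)

-- ===== LEMMAS AND PROOFS =====

-- once the flag is false, everything goes to codeb
theorem foldA_false (m : List Char) (ls : List (List Char)) (cf cb : List Char) :
    ls.foldl (pvStepA m) (cf, cb, false) = (cf, cb ++ pvFmtB ls, false) := by
  induction ls generalizing cb with
  | nil => simp [pvFmtB]
  | cons a t ih =>
      have hstep : pvStepA m (cf, cb, false) a
          = (cf, cb ++ "        ".toList ++ a ++ ['\n'], false) := by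
        cases h : PySem.Chars.isIn m a <;>
          simp [pvStepA, h, List.append_assoc]
      simp [hstep, ih, pvFmtB, List.append_assoc]

-- with the flag still true, the fold splits at the first matching line
theorem foldA_true (m : List Char) (ls : List (List Char)) (cf cb : List Char) :
    ∃ b, ls.foldl (pvStepA m) (cf, cb, true)
      = (cf ++ pvFmtB (ls.take (ls.findIdx (fun l => PySem.Chars.isIn m l))),
         cb ++ pvFmtB (ls.drop (ls.findIdx (fun l => PySem.Chars.isIn m l))), b) := by
  induction ls generalizing cf with
  | nil => exact ⟨true, by simp [pvFmtB]⟩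
  | cons a t ih =>
      cases h : PySem.Chars.isIn m a with
      | true =>
          have hstep : pvStepA m (cf, cb, true) a
              = (cf, cb ++ "        ".toList ++ a ++ ['\n'], false) := by
            simp [pvStepA, h, List.append_assoc]
          refine ⟨false, ?_⟩
          simp [hstep, foldA_false, List.findIdx_cons, h, pvFmtB, List.append_assoc]
      | false =>
          have hstep : pvStepA m (cf, cb, true) a
              = (cf ++ "        ".toList ++ a ++ ['\n'], cb, true) := by
            simp [pvStepA, h, List.append_assoc]
          obtain ⟨b, hb⟩ := ih (cf ++ "        ".toList ++ a ++ ['\n'])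
          refine ⟨b, ?_⟩
          rw [List.foldl_cons, hstep, hb, List.findIdx_cons]
          simp [h, pvFmtB, List.append_assoc]

-- ===== VERDICT (by name: the statement is the Claim_ definition above) =====
theorem use_till_find_spec : Claim_equal_use_till_find := by
  intro lines module_name _
  unfold Spec_use_till_find use_till_find use_till_find_alt
  obtain ⟨b, hb⟩ := foldA_true module_name.toList
    (PySem.Chars.splitOn lines.toList "\n".toList) [] []
  simp only [hb]
  simp
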